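-- pv_equiv track=rewrite | github.com/crepererum/otel2chrome | convert.py | expand_time_ranges
-- ===== SOURCE A (Python) =====
-- def expand_time_ranges(time_ranges, children):
--     # fill task stack w/ roots (i.e. spans w/o any children)
--     roots = set(time_ranges)
--     for span_id, child_ids in children.items():
--         # ignore parent->child relationships if the parent is not part of the trace
--         if span_id not in time_ranges:
--             continue
--
--         for child_id in child_ids:
--             roots.remove(child_id)
--
--     stack = [
--         (span_id, 0)
--         for span_id in sorted(roots, key=lambda span_id: time_ranges[span_id])
--     ]
--     added_children = set()
--     out = {}
--
--     while stack:
--         current, depth = stack[-1]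
--
--         if current not in added_children and current in children:
--             child_ids = sorted(
--                 (
--                     child_id
--                     for child_id in children[current]
--                     # ignore parent->child relationships if the parent is not part of the trace
--                     if child_id in time_ranges
--                 )
--             )
--             for child_id in child_ids:
--                 stack.append((child_id, depth + 1))
--             added_children.add(current)
--             continue
--
--         stack.pop()
--
--         t_begin, t_end = time_ranges[current]
--
--         # speedscope is messy and uses some timestamp-based stack, so "shrink" the event by a few NS depending on the
--         # stack size to avoid overlaps
--         # TODO: this is a hack, we should have a proper overlap fix
--         add = 100 - depth
--         t_begin -= add
--         t_end += add
--
--         if current in children: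
--             child_ids = children[current]
--             t_begin = min(
--                 t_begin,
--                 min(out[i][0] for i in child_ids),
--             )
--             t_end = max(
--                 t_end,
--                 max(out[i][1] for i in child_ids),
--             )
--         out[current] = (t_begin, t_end, depth)
--
--     return out
-- ===== SOURCE B (Python) =====
-- def expand_time_ranges(time_ranges, children):
--     # fill task stack w/ roots (i.e. spans w/o any children)
--     roots = set(time_ranges)
--     for span_id, child_ids in children.items():
--         # ignore parent->child relationships if the parent is not part of the trace
--         if span_id not in time_ranges:
--             continue
--
--         for child_id in child_ids:
--             roots.remove(child_id)
--
--     out = {}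
--
--     def visit(span_id, depth):
--         # recurse into the children first (descending, matching A's LIFO pop order),
--         # then emit this span's own entry
--         if span_id in children:
--             for child_id in reversed(
--                 sorted(c for c in children[span_id] if c in time_ranges)
--             ):
--                 visit(child_id, depth + 1)
--
--         t_begin, t_end = time_ranges[span_id]
--         add = 100 - depth
--         t_begin -= add
--         t_end += add
--
--         if span_id in children:
--             t_begin = min(t_begin, min(out[i][0] for i in children[span_id]))
--             t_end = max(t_end, max(out[i][1] for i in children[span_id]))
--         out[span_id] = (t_begin, t_end, depth)
--
--     for root in reversed(sorted(roots, key=lambda s: time_ranges[s])):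
--         visit(root, 0)
--
--     return out
-- ===== Notes on version B (the rewrite author's own statement) =====
-- stated objective: simpler
-- what changed: The explicit stack / added_children re-visit machinery is replaced by a recursive post-order helper visit(span_id, depth) that recurses into each (filtered, descending-sorted) child and then emits the span's entry, called once per root.
import Mathlib
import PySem

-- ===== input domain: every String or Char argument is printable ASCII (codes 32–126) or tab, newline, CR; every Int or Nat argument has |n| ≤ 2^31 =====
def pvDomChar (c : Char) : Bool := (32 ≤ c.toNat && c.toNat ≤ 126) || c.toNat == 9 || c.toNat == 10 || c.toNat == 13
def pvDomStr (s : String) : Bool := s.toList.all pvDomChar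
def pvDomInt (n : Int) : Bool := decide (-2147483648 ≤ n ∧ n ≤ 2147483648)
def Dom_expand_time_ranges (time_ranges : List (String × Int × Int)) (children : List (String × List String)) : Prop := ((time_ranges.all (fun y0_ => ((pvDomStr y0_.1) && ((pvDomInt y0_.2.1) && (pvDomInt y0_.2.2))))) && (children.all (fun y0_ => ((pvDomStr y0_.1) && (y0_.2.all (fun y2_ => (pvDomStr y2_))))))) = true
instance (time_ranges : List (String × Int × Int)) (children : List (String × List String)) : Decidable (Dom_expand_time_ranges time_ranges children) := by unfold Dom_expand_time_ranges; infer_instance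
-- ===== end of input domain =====

-- B replaces A's explicit stack / added_children machinery by a recursive post-order DFS
-- helper (same traversal order, same values); equal results proved on Pre_.


-- ===== PORT A =====
-- helpers shared by both ports: the Python lines they transliterate are identical in Source A and Source B
-- (the roots-removal loop), or are the builtins min()/max() over a nonempty iterable.
def pvMinList (l : List Int) : Int :=
  match l with
  | [] => 0          -- Python raises ValueError here; excluded by Pre_
  | x :: xs => xs.foldl min x

def pvMaxList (l : List Int) : Int :=
  match l with
  | [] => 0          -- Python raises ValueError here; excluded by Pre_
  | x :: xs => xs.foldl max x

-- roots = set(time_ranges); for span_id, child_ids in children.items(): if span_id in time_ranges: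
--   for child_id in child_ids: roots.remove(child_id)          (identical lines in Source A and Source B)
def pvRoots (tr : PySem.Dict String (Int × Int)) (ch : PySem.Dict String (List String)) : PySem.Set String :=
  ch.items.foldl
    (fun r pc =>
      if tr.contains pc.1 then
        pc.2.foldl (fun s c => (PySem.Set.remove? s c).getD s) r   -- KeyError = none; excluded by Pre_
      else r)
    (PySem.Set.ofList tr.keys)

-- the while-loop of A; stack head = Python stack top; fuel only cuts runs A never finishes inside Pre_
def pvALoop (tr : PySem.Dict String (Int × Int)) (ch : PySem.Dict String (List String)) :
    Nat → List (String × Int) → PySem.Set String → PySem.Dict String (Int × Int × Int) →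
    PySem.Dict String (Int × Int × Int)
  | 0, _, _, out => out
  | _ + 1, [], _, out => out
  | fuel + 1, (current, depth) :: rest, added, out =>
    if !(PySem.Set.contains added current) && ch.contains current then
      let child_ids :=
        PySem.List.sorted ((ch.getD current []).filter (fun c => tr.contains c)) (fun x => x) false
      pvALoop tr ch fuel
        ((child_ids.reverse.map (fun c => (c, depth + 1))) ++ (current, depth) :: rest)
        (PySem.Set.add added current) out
    else
      let tv := tr.getD current (0, 0)
      let add := 100 - depth
      let t_begin := tv.1 - add
      let t_end := tv.2 + add
      let p :=
        if ch.contains current then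
          let child_ids := ch.getD current []
          (min t_begin (pvMinList (child_ids.map (fun i => (out.getD i (0, 0, 0)).1))),
           max t_end (pvMaxList (child_ids.map (fun i => (out.getD i (0, 0, 0)).2.1))))
        else (t_begin, t_end)
      pvALoop tr ch fuel rest added (out.insert current (p.1, p.2, depth))

def expand_time_ranges (time_ranges : List (String × Int × Int)) (children : List (String × List String)) : List (String × Int × Int × Int) :=
  let tr := PySem.Dict.ofList time_ranges
  let ch := PySem.Dict.ofList children
  let roots := pvRoots tr ch
  let stack :=
    ((PySem.List.sorted2 roots (fun s => (tr.getD s (0, 0)).1) (fun s => (tr.getD s (0, 0)).2) false).map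
      (fun s => (s, (0 : Int)))).reverse
  (pvALoop tr ch (2 * time_ranges.length + 1) stack PySem.Set.empty PySem.Dict.empty).items

-- ===== PORT B =====
-- visit(span_id, depth) of Source B and its child for-loop; fuel bounds the recursion depth only
mutual
def pvVisit (tr : PySem.Dict String (Int × Int)) (ch : PySem.Dict String (List String))
    (fuel : Nat) (span_id : String) (depth : Int)
    (out : PySem.Dict String (Int × Int × Int)) : PySem.Dict String (Int × Int × Int) :=
  match fuel with
  | 0 => out
  | fuel + 1 =>
    let out1 :=
      if ch.contains span_id then
        pvVisitList tr ch fuel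
          ((PySem.List.sorted ((ch.getD span_id []).filter (fun c => tr.contains c)) (fun x => x) false).reverse)
          (depth + 1) out
      else out
    let tv := tr.getD span_id (0, 0)
    let add := 100 - depth
    let t_begin := tv.1 - add
    let t_end := tv.2 + add
    let p :=
      if ch.contains span_id then
        let child_ids := ch.getD span_id []
        (min t_begin (pvMinList (child_ids.map (fun i => (out1.getD i (0, 0, 0)).1))),
         max t_end (pvMaxList (child_ids.map (fun i => (out1.getD i (0, 0, 0)).2.1))))
      else (t_begin, t_end)
    out1.insert span_id (p.1, p.2, depth)
termination_by (fuel, 0)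

def pvVisitList (tr : PySem.Dict String (Int × Int)) (ch : PySem.Dict String (List String))
    (fuel : Nat) (ks : List String) (depth : Int)
    (out : PySem.Dict String (Int × Int × Int)) : PySem.Dict String (Int × Int × Int) :=
  match ks with
  | [] => out
  | k :: ks' => pvVisitList tr ch fuel ks' depth (pvVisit tr ch fuel k depth out)
termination_by (fuel, ks.length + 1)
end

def expand_time_ranges_alt (time_ranges : List (String × Int × Int)) (children : List (String × List String)) : List (String × Int × Int × Int) :=
  let tr := PySem.Dict.ofList time_ranges
  let ch := PySem.Dict.ofList children
  let roots := pvRoots tr ch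
  let rootList :=
    (PySem.List.sorted2 roots (fun s => (tr.getD s (0, 0)).1) (fun s => (tr.getD s (0, 0)).2) false).reverse
  (pvVisitList tr ch (time_ranges.length + 1) rootList 0 PySem.Dict.empty).items

-- ===== PRECONDITION & SPEC =====
-- Pre_ excludes inputs on which A raises (roots.remove KeyError: a child of an in-trace parent that is
-- missing from time_ranges or referenced twice; out[i] KeyError; min()/max() ValueError on an empty child
-- list — the empty-list condition is required for every in-trace parent, so it also excludes some inputs
-- where such a parent sits on an unreachable cycle and A still returns a value), and duplicate-key
-- association lists, which a Python dict cannot represent.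
def Pre_expand_time_ranges (time_ranges : List (String × Int × Int)) (children : List (String × List String)) : Prop :=
  (time_ranges.map (·.1)).Nodup ∧
  (children.map (·.1)).Nodup ∧
  (∀ p ∈ children, p.1 ∈ time_ranges.map (·.1) →
      p.2.Nodup ∧ p.2 ≠ [] ∧ ∀ c ∈ p.2, c ∈ time_ranges.map (·.1)) ∧
  children.Pairwise (fun a b =>
    a.1 ∈ time_ranges.map (·.1) → b.1 ∈ time_ranges.map (·.1) → ∀ x ∈ a.2, x ∉ b.2)
instance (time_ranges : List (String × Int × Int)) (children : List (String × List String)) : Decidable (Pre_expand_time_ranges time_ranges children) := by unfold Pre_expand_time_ranges; infer_instance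

def pvWitness_expand_time_ranges : (List (String × Int × Int)) × (List (String × List String)) :=
  ([("a", (0, 10)), ("b", (2, 3))], [("a", ["b"])])

def Spec_expand_time_ranges (time_ranges : List (String × Int × Int)) (children : List (String × List String)) (out : List (String × Int × Int × Int)) : Prop := out = expand_time_ranges_alt time_ranges children
instance (time_ranges : List (String × Int × Int)) (children : List (String × List String)) (out : List (String × Int × Int × Int)) : Decidable (Spec_expand_time_ranges time_ranges children out) := by unfold Spec_expand_time_ranges; infer_instance

-- ===== CLAIM (what is proved, stated in full; the proofs are below) =====
def Claim_equal_expand_time_ranges : Prop := ∀ (time_ranges : List (String × Int × Int)) (children : List (String × List String)), Dom_expand_time_ranges time_ranges children → Pre_expand_time_ranges time_ranges children → Spec_expand_time_ranges time_ranges children (expand_time_ranges time_ranges children)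

-- ===== LEMMAS AND PROOFS =====

-- proof-side view of the traversal graph
def pvKids (tr : PySem.Dict String (Int × Int)) (ch : PySem.Dict String (List String)) (c : String) : List String :=
  if ch.contains c then
    (PySem.List.sorted ((ch.getD c []).filter (fun x => tr.contains x)) (fun x => x) false).reverse
  else []

def pvVisited (tr : PySem.Dict String (Int × Int)) (ch : PySem.Dict String (List String)) : Nat → String → List String
  | 0, _ => []
  | g + 1, c => (pvKids tr ch c).flatMap (pvVisited tr ch g) ++ [c]

def pvComplete (tr : PySem.Dict String (Int × Int)) (ch : PySem.Dict String (List String)) : Nat → String → Prop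
  | 0, _ => False
  | g + 1, c => ∀ k ∈ pvKids tr ch c, pvComplete tr ch g k

def pvCost (tr : PySem.Dict String (Int × Int)) (ch : PySem.Dict String (List String)) : Nat → String → Nat
  | 0, _ => 0
  | g + 1, c => if ch.contains c then 2 + ((pvKids tr ch c).map (pvCost tr ch g)).sum else 1

theorem pvALoop_nil (tr : PySem.Dict String (Int × Int)) (ch : PySem.Dict String (List String))
    (f : Nat) (a : PySem.Set String) (o : PySem.Dict String (Int × Int × Int)) :
    pvALoop tr ch f [] a o = o := by
  cases f <;> rfl

-- one expansion+pop round of A's loop equals one call of B's visit (statement of the inner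
-- list form takes the outer induction hypothesis as an argument)
theorem pvSimList (tr : PySem.Dict String (Int × Int)) (ch : PySem.Dict String (List String)) (g : Nat)
    (ih : ∀ (c : String) (d : Int) (rest : List (String × Int)) (added : PySem.Set String)
      (out : PySem.Dict String (Int × Int × Int)) (f : Nat),
      pvComplete tr ch g c →
      (pvVisited tr ch g c).Nodup →
      (∀ x ∈ pvVisited tr ch g c, PySem.Set.contains added x = false) →
      ∃ added' : PySem.Set String,
        (∀ x, PySem.Set.contains added' x =
          (PySem.Set.contains added x || (decide (x ∈ pvVisited tr ch g c) && ch.contains x))) ∧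
        pvALoop tr ch (pvCost tr ch g c + f) ((c, d) :: rest) added out
          = pvALoop tr ch f rest added' (pvVisit tr ch g c d out)) :
    ∀ (ks : List String) (d : Int) (rest : List (String × Int)) (added : PySem.Set String)
      (out : PySem.Dict String (Int × Int × Int)) (f : Nat),
      (∀ k ∈ ks, pvComplete tr ch g k) →
      (ks.flatMap (pvVisited tr ch g)).Nodup →
      (∀ x ∈ ks.flatMap (pvVisited tr ch g), PySem.Set.contains added x = false) →
      ∃ added' : PySem.Set String,
        (∀ x, PySem.Set.contains added' x =
          (PySem.Set.contains added x || (decide (x ∈ ks.flatMap (pvVisited tr ch g)) && ch.contains x))) ∧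
        pvALoop tr ch ((ks.map (pvCost tr ch g)).sum + f) ((ks.map (fun k => (k, d))) ++ rest) added out
          = pvALoop tr ch f rest added' (pvVisitList tr ch g ks d out) := by
  intro ks
  induction ks with
  | nil =>
    intro d rest added out f _ _ _
    exact ⟨added, by simp, by simp [pvVisitList]⟩
  | cons k ks ihl =>
    intro d rest added out f hcomp hnd hadd
    have hndk : (pvVisited tr ch g k).Nodup := by
      have := hnd
      simp only [List.flatMap_cons, List.nodup_append] at this
      exact this.1
    have hdisj : ∀ x ∈ ks.flatMap (pvVisited tr ch g), x ∉ pvVisited tr ch g k := by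
      intro x hx
      have := hnd
      simp only [List.flatMap_cons, List.nodup_append] at this
      exact fun hxk => this.2.2 x hxk x hx rfl
    obtain ⟨added1, hext1, heq1⟩ := ih k d ((ks.map (fun k => (k, d))) ++ rest) added out
      ((ks.map (pvCost tr ch g)).sum + f)
      (hcomp k (by simp)) hndk
      (fun x hx => hadd x (by simp [hx]))
    obtain ⟨added2, hext2, heq2⟩ := ihl d rest added1 (pvVisit tr ch g k d out) f
      (fun k' hk' => hcomp k' (by simp [hk']))
      (by
        have := hnd
        simp only [List.flatMap_cons, List.nodup_append] at this
        exact this.2.1)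
      (by
        intro x hx
        rw [hext1 x, hadd x (by simp [hx])]
        have : x ∉ pvVisited tr ch g k := hdisj x hx
        simp [this])
    refine ⟨added2, ?_, ?_⟩
    · intro x
      rw [hext2 x, hext1 x]
      by_cases hx : x ∈ pvVisited tr ch g k <;>
        by_cases hx2 : x ∈ ks.flatMap (pvVisited tr ch g) <;>
          simp [hx, hx2]
    · calc pvALoop tr ch ((List.map (pvCost tr ch g) (k :: ks)).sum + f)
            (List.map (fun k => (k, d)) (k :: ks) ++ rest) added out
          = pvALoop tr ch (pvCost tr ch g k + ((ks.map (pvCost tr ch g)).sum + f))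
            ((k, d) :: (List.map (fun k => (k, d)) ks ++ rest)) added out := by
            simp [Nat.add_assoc]
      _ = pvALoop tr ch ((ks.map (pvCost tr ch g)).sum + f)
            (List.map (fun k => (k, d)) ks ++ rest) added1 (pvVisit tr ch g k d out) := heq1
      _ = pvALoop tr ch f rest added2 (pvVisitList tr ch g ks d (pvVisit tr ch g k d out)) := heq2
      _ = pvALoop tr ch f rest added2 (pvVisitList tr ch g (k :: ks) d out) := by
            rw [pvVisitList]
theorem pvSim (tr : PySem.Dict String (Int × Int)) (ch : PySem.Dict String (List String)) :
    ∀ (g : Nat) (c : String) (d : Int) (rest : List (String × Int)) (added : PySem.Set String)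
      (out : PySem.Dict String (Int × Int × Int)) (f : Nat),
      pvComplete tr ch g c →
      (pvVisited tr ch g c).Nodup →
      (∀ x ∈ pvVisited tr ch g c, PySem.Set.contains added x = false) →
      ∃ added' : PySem.Set String,
        (∀ x, PySem.Set.contains added' x =
          (PySem.Set.contains added x || (decide (x ∈ pvVisited tr ch g c) && ch.contains x))) ∧
        pvALoop tr ch (pvCost tr ch g c + f) ((c, d) :: rest) added out
          = pvALoop tr ch f rest added' (pvVisit tr ch g c d out) := by
  intro g
  induction g with
  | zero =>
    intro c d rest added out f hcomp
    exact absurd hcomp (by simp [pvComplete])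
  | succ g IH =>
    intro c d rest added out f hcomp hnd hadd
    by_cases hch : ch.contains c = true
    · -- c has a children entry: A expands, then pops; B recurses, then inserts
      have hvis : pvVisited tr ch (g + 1) c
          = (pvKids tr ch c).flatMap (pvVisited tr ch g) ++ [c] := by simp [pvVisited]
      have hcost : pvCost tr ch (g + 1) c
          = 2 + ((pvKids tr ch c).map (pvCost tr ch g)).sum := by simp [pvCost, hch]
      have haddc : PySem.Set.contains added c = false := hadd c (by rw [hvis]; simp)
      have hndfl : ((pvKids tr ch c).flatMap (pvVisited tr ch g)).Nodup := by
        have := hnd; rw [hvis, List.nodup_append] at this; exact this.1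
      have hcnot : c ∉ (pvKids tr ch c).flatMap (pvVisited tr ch g) := by
        have := hnd; rw [hvis, List.nodup_append] at this
        intro hc; exact this.2.2 c hc c (by simp) rfl
      have hcompk : ∀ k ∈ pvKids tr ch c, pvComplete tr ch g k := by
        simpa [pvComplete] using hcomp
      obtain ⟨added1, hext1, heq1⟩ := pvSimList tr ch g IH (pvKids tr ch c) (d + 1)
        ((c, d) :: rest) (PySem.Set.add added c) out (1 + f) hcompk hndfl
        (by
          intro x hx
          have hxc : x ≠ c := fun h => hcnot (h ▸ hx)
          have h0 := hadd x (by rw [hvis]; exact List.mem_append_left _ hx)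
          rw [PySem.Set.contains_eq_decide] at h0 ⊢
          simp only [decide_eq_false_iff_not] at h0 ⊢
          simp [PySem.Set.mem_add, h0, hxc])
      have haddc1 : PySem.Set.contains added1 c = true := by
        rw [hext1 c, PySem.Set.contains_eq_decide]
        simp [PySem.Set.mem_add]
      refine ⟨added1, ?_, ?_⟩
      · intro x
        rw [hext1 x, PySem.Set.contains_eq_decide, PySem.Set.contains_eq_decide, hvis]
        by_cases hxc : x = c
        · subst hxc; simp [PySem.Set.mem_add, hch]
        · simp [PySem.Set.mem_add, hxc]
      · have hfe : pvCost tr ch (g + 1) c + f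
            = (((pvKids tr ch c).map (pvCost tr ch g)).sum + (1 + f)) + 1 := by
          rw [hcost]; omega
        rw [hfe]
        have hcondT : (!(PySem.Set.contains added c) && ch.contains c) = true := by
          rw [haddc, hch]; rfl
        have hkids : (PySem.List.sorted ((ch.getD c []).filter (fun x => tr.contains x))
            (fun x => x) false).reverse = pvKids tr ch c := by simp [pvKids, hch]
        simp only [pvALoop, hcondT, if_true, hkids]
        rw [heq1]
        rw [Nat.add_comm 1 f]
        simp only [pvALoop, haddc1, Bool.not_true, Bool.false_and]
        have hvv : pvVisit tr ch (g + 1) c d out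
            = let out1 := pvVisitList tr ch g (pvKids tr ch c) (d + 1) out
              let tv := tr.getD c (0, 0)
              let add := 100 - d
              let t_begin := tv.1 - add
              let t_end := tv.2 + add
              let p :=
                (min t_begin (pvMinList ((ch.getD c []).map (fun i => (out1.getD i (0, 0, 0)).1))),
                 max t_end (pvMaxList ((ch.getD c []).map (fun i => (out1.getD i (0, 0, 0)).2.1))))
              out1.insert c (p.1, p.2, d) := by
          simp only [pvVisit, hch, if_true, hkids]
        rw [hvv]
        simp [hch]
    · -- no children entry: one pop step on the A side, no recursion on the B side
      have hch' : ch.contains c = false := by simpa using hch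
      have hvis : pvVisited tr ch (g + 1) c = [c] := by simp [pvVisited, pvKids, hch']
      refine ⟨added, ?_, ?_⟩
      · intro x
        by_cases hxc : x = c
        · subst hxc; simp [hvis, hch']
        · simp [hvis, hxc]
      · have hfe : pvCost tr ch (g + 1) c + f = f + 1 := by simp [pvCost, hch']; omega
        rw [hfe]
        simp only [pvALoop, pvVisit, hch', Bool.and_false, if_false, Bool.false_eq_true]

-- whole run: the stack seeded with the roots equals B's root loop
theorem pvTop (tr : PySem.Dict String (Int × Int)) (ch : PySem.Dict String (List String))
    (G : Nat) (rs : List String) (f : Nat)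
    (hcomp : ∀ r ∈ rs, pvComplete tr ch G r)
    (hnd : (rs.flatMap (pvVisited tr ch G)).Nodup) :
    pvALoop tr ch ((rs.map (pvCost tr ch G)).sum + f) (rs.map (fun r => (r, (0 : Int))))
        PySem.Set.empty PySem.Dict.empty
      = pvVisitList tr ch G rs 0 PySem.Dict.empty := by
  obtain ⟨added', _, heq⟩ := pvSimList tr ch G (pvSim tr ch G) rs 0 [] PySem.Set.empty
    PySem.Dict.empty f hcomp hnd
    (fun x _ => by rw [PySem.Set.contains_eq_decide]; simp [PySem.Set.empty])
  rw [List.append_nil] at heq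
  rw [heq, pvALoop_nil]

theorem pvKids_tr (tr : PySem.Dict String (Int × Int)) (ch : PySem.Dict String (List String))
    (c : String) : ∀ x ∈ pvKids tr ch c, tr.contains x = true := by
  intro x hx
  by_cases hch : ch.contains c = true
  · simp only [pvKids, hch, if_true, List.mem_reverse, PySem.List.mem_sorted,
      List.mem_filter] at hx
    exact hx.2
  · simp [pvKids, hch] at hx

theorem pvPairwise_cases {α : Type} {R : α → α → Prop} :
    ∀ {l : List α}, l.Pairwise R → ∀ {a b : α}, a ∈ l → b ∈ l → a = b ∨ R a b ∨ R b a := by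
  intro l hl
  induction hl with
  | nil => intro a b ha _; exact absurd ha (by simp)
  | cons hr _ ih =>
    intro a b ha hb
    rcases List.mem_cons.mp ha with ha | ha <;> rcases List.mem_cons.mp hb with hb | hb
    · exact Or.inl (ha.trans hb.symm)
    · exact Or.inr (Or.inl (ha ▸ hr b hb))
    · exact Or.inr (Or.inr (hb ▸ hr a ha))
    · exact ih ha hb

-- the unique-parent forest facts: completeness within the key-count bound, nodup traversal
theorem pvTList (tr : PySem.Dict String (Int × Int)) (ch : PySem.Dict String (List String))
    (g : Nat)
    (ih : ∀ (c : String) (R : Finset String),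
      tr.contains c = true → c ∉ R →
      (∀ p, tr.contains p = true → c ∈ pvKids tr ch p → p ∈ R) →
      (∀ v ∈ R, ∀ p, tr.contains p = true → v ∈ pvKids tr ch p → p ∈ R) →
      (tr.keys.toFinset \ R).card < g →
      pvComplete tr ch g c ∧
      (pvVisited tr ch g c).Nodup ∧
      (∀ x ∈ pvVisited tr ch g c, tr.contains x = true ∧ x ∉ R) ∧
      (∀ v, (v ∈ R ∨ v ∈ pvVisited tr ch g c) → ∀ p, tr.contains p = true →
          v ∈ pvKids tr ch p → (p ∈ R ∨ p ∈ pvVisited tr ch g c)) ∧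
      (∀ v ∈ pvVisited tr ch g c, v = c ∨ ∃ w ∈ pvVisited tr ch g c, v ∈ pvKids tr ch w)) :
    ∀ (ks : List String) (R₀ : Finset String),
      (∀ k ∈ ks, tr.contains k = true) →
      (∀ k ∈ ks, k ∉ R₀) →
      (∀ k ∈ ks, ∀ p, tr.contains p = true → k ∈ pvKids tr ch p → p ∈ R₀) →
      (∀ v ∈ R₀, ∀ p, tr.contains p = true → v ∈ pvKids tr ch p → p ∈ R₀) →
      ks.Nodup →
      (tr.keys.toFinset \ R₀).card < g →
      (∀ k ∈ ks, pvComplete tr ch g k) ∧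
      (ks.flatMap (pvVisited tr ch g)).Nodup ∧
      (∀ x ∈ ks.flatMap (pvVisited tr ch g), tr.contains x = true ∧ x ∉ R₀) ∧
      (∀ v, (v ∈ R₀ ∨ v ∈ ks.flatMap (pvVisited tr ch g)) → ∀ p, tr.contains p = true →
          v ∈ pvKids tr ch p → (p ∈ R₀ ∨ p ∈ ks.flatMap (pvVisited tr ch g))) ∧
      (∀ v ∈ ks.flatMap (pvVisited tr ch g), v ∈ ks ∨ ∃ w ∈ ks.flatMap (pvVisited tr ch g),
          v ∈ pvKids tr ch w) := by
  intro ks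
  induction ks with
  | nil =>
    intro R₀ _ _ _ hINV _ _
    refine ⟨by simp, by simp, by simp, ?_, by simp⟩
    intro v hv p hp hk
    simp only [List.flatMap_nil, List.not_mem_nil, or_false] at hv ⊢
    exact hINV v hv p hp hk
  | cons k ks ihl =>
    intro R₀ hksT hksR hksP hINV hksND hcard
    obtain ⟨Ck, NDk, SUBk, INVk, PARk⟩ := ih k R₀ (hksT k (by simp)) (hksR k (by simp))
      (hksP k (by simp)) hINV hcard
    have hVkR : ∀ x ∈ pvVisited tr ch g k, x ∉ R₀ := fun x hx => (SUBk x hx).2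
    have hINVk' : ∀ v ∈ R₀ ∪ (pvVisited tr ch g k).toFinset, ∀ p, tr.contains p = true →
        v ∈ pvKids tr ch p → p ∈ R₀ ∪ (pvVisited tr ch g k).toFinset := by
      intro v hv p hp hk
      rw [Finset.mem_union, List.mem_toFinset] at hv
      rcases INVk v hv p hp hk with h | h
      · exact Finset.mem_union_left _ h
      · exact Finset.mem_union_right _ (List.mem_toFinset.mpr h)
    obtain ⟨C', ND', SUB', INV', PAR'⟩ := ihl (R₀ ∪ (pvVisited tr ch g k).toFinset)
      (fun k' hk' => hksT k' (by simp [hk']))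
      (by
        intro k' hk'
        rw [Finset.mem_union, List.mem_toFinset]
        rintro (h | h)
        · exact hksR k' (by simp [hk']) h
        · rcases PARk k' h with rfl | ⟨w, hw, hkw⟩
          · exact (List.nodup_cons.mp hksND).1 hk'
          · exact (SUBk w hw).2 (hksP k' (by simp [hk']) w (SUBk w hw).1 hkw))
      (fun k' hk' p hp hkp => Finset.mem_union_left _ (hksP k' (by simp [hk']) p hp hkp))
      hINVk'
      (List.nodup_cons.mp hksND).2
      (lt_of_le_of_lt (Finset.card_le_card (Finset.sdiff_subset_sdiff (Finset.Subset.refl _)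
        Finset.subset_union_left)) hcard)
    have hdisj : ∀ x ∈ ks.flatMap (pvVisited tr ch g), x ∉ pvVisited tr ch g k := by
      intro x hx hxk
      exact (SUB' x hx).2 (Finset.mem_union_right _ (List.mem_toFinset.mpr hxk))
    refine ⟨?_, ?_, ?_, ?_, ?_⟩
    · intro k' hk'
      rcases List.mem_cons.mp hk' with rfl | h
      · exact Ck
      · exact C' k' h
    · rw [List.flatMap_cons, List.nodup_append]
      exact ⟨NDk, ND', fun a ha b hb hab => hdisj b hb (hab ▸ ha)⟩
    · intro x hx
      rw [List.flatMap_cons, List.mem_append] at hx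
      rcases hx with hx | hx
      · exact SUBk x hx
      · exact ⟨(SUB' x hx).1, fun hR => (SUB' x hx).2 (Finset.mem_union_left _ hR)⟩
    · intro v hv p hp hk
      rw [List.flatMap_cons, List.mem_append] at hv ⊢
      have hv' : v ∈ R₀ ∪ (pvVisited tr ch g k).toFinset ∨ v ∈ ks.flatMap (pvVisited tr ch g) := by
        rcases hv with hv | hv | hv
        · exact Or.inl (Finset.mem_union_left _ hv)
        · exact Or.inl (Finset.mem_union_right _ (List.mem_toFinset.mpr hv))
        · exact Or.inr hv
      rcases INV' v hv' p hp hk with h | h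
      · rw [Finset.mem_union, List.mem_toFinset] at h
        rcases h with h | h
        · exact Or.inl h
        · exact Or.inr (Or.inl h)
      · exact Or.inr (Or.inr h)
    · intro v hv
      rw [List.flatMap_cons, List.mem_append] at hv
      rcases hv with hv | hv
      · rcases PARk v hv with rfl | ⟨w, hw, hkw⟩
        · exact Or.inl (by simp)
        · exact Or.inr ⟨w, by simp [List.flatMap_cons, hw], hkw⟩
      · rcases PAR' v hv with h | ⟨w, hw, hkw⟩
        · exact Or.inl (by simp [h])
        · exact Or.inr ⟨w, by simp [List.flatMap_cons, hw], hkw⟩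

theorem pvT (tr : PySem.Dict String (Int × Int)) (ch : PySem.Dict String (List String))
    (hUP : ∀ p q x, tr.contains p = true → tr.contains q = true →
      x ∈ pvKids tr ch p → x ∈ pvKids tr ch q → p = q)
    (hKN : ∀ p, tr.contains p = true → (pvKids tr ch p).Nodup) :
    ∀ (g : Nat) (c : String) (R : Finset String),
      tr.contains c = true → c ∉ R →
      (∀ p, tr.contains p = true → c ∈ pvKids tr ch p → p ∈ R) →
      (∀ v ∈ R, ∀ p, tr.contains p = true → v ∈ pvKids tr ch p → p ∈ R) →
      (tr.keys.toFinset \ R).card < g →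
      pvComplete tr ch g c ∧
      (pvVisited tr ch g c).Nodup ∧
      (∀ x ∈ pvVisited tr ch g c, tr.contains x = true ∧ x ∉ R) ∧
      (∀ v, (v ∈ R ∨ v ∈ pvVisited tr ch g c) → ∀ p, tr.contains p = true →
          v ∈ pvKids tr ch p → (p ∈ R ∨ p ∈ pvVisited tr ch g c)) ∧
      (∀ v ∈ pvVisited tr ch g c, v = c ∨ ∃ w ∈ pvVisited tr ch g c, v ∈ pvKids tr ch w) := by
  intro g
  induction g with
  | zero =>
    intro c R _ hcR _ _ hcard
    exact absurd hcard (by simp)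
  | succ g IH =>
    intro c R hcT hcR hcP hINV hcard
    have hcKeys : c ∈ tr.keys.toFinset := by
      rw [List.mem_toFinset]
      exact (PySem.Dict.contains_iff_mem_keys tr c).mp hcT
    have hkR : ∀ k ∈ pvKids tr ch c, k ∉ insert c R := by
      intro k hk hkin
      rcases Finset.mem_insert.mp hkin with h | hkin
      · exact hcR (hcP c hcT (h ▸ hk))
      · exact hcR (hINV k hkin c hcT hk)
    obtain ⟨C', ND', SUB', INV', PAR'⟩ := pvTList tr ch g IH (pvKids tr ch c) (insert c R)
      (fun k hk => pvKids_tr tr ch c k hk)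
      hkR
      (by
        intro k hk p hp hkp
        have := hUP p c k hp hcT hkp hk
        exact Finset.mem_insert.mpr (Or.inl this))
      (by
        intro v hv p hp hkp
        rcases Finset.mem_insert.mp hv with rfl | hv
        · exact Finset.mem_insert.mpr (Or.inr (hcP p hp hkp))
        · exact Finset.mem_insert.mpr (Or.inr (hINV v hv p hp hkp)))
      (hKN c hcT)
      (by
        have h1 : tr.keys.toFinset \ insert c R = (tr.keys.toFinset \ R).erase c := by
          rw [Finset.sdiff_insert]
        have h2 : c ∈ tr.keys.toFinset \ R := Finset.mem_sdiff.mpr ⟨hcKeys, hcR⟩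
        have h3 : 0 < (tr.keys.toFinset \ R).card := Finset.card_pos.mpr ⟨c, h2⟩
        rw [h1, Finset.card_erase_of_mem h2]
        omega)
    have hvis : pvVisited tr ch (g + 1) c
        = (pvKids tr ch c).flatMap (pvVisited tr ch g) ++ [c] := by simp [pvVisited]
    have hcV : c ∉ (pvKids tr ch c).flatMap (pvVisited tr ch g) := by
      intro hc
      exact (SUB' c hc).2 (Finset.mem_insert_self c R)
    refine ⟨?_, ?_, ?_, ?_, ?_⟩
    · simpa [pvComplete] using C'
    · rw [hvis, List.nodup_append]
      exact ⟨ND', List.nodup_singleton c, fun a ha b hb hab => by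
        rw [List.mem_singleton] at hb
        exact hcV ((hab.trans hb) ▸ ha)⟩
    · intro x hx
      rw [hvis, List.mem_append, List.mem_singleton] at hx
      rcases hx with hx | rfl
      · exact ⟨(SUB' x hx).1, fun hR => (SUB' x hx).2 (Finset.mem_insert.mpr (Or.inr hR))⟩
      · exact ⟨hcT, hcR⟩
    · intro v hv p hp hk
      rw [hvis, List.mem_append, List.mem_singleton] at hv ⊢
      have hv' : v ∈ insert c R ∨ v ∈ (pvKids tr ch c).flatMap (pvVisited tr ch g) := by
        rcases hv with hv | hv | rfl
        · exact Or.inl (Finset.mem_insert.mpr (Or.inr hv))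
        · exact Or.inr hv
        · exact Or.inl (Finset.mem_insert_self _ _)
      rcases INV' v hv' p hp hk with h | h
      · rcases Finset.mem_insert.mp h with rfl | h
        · exact Or.inr (Or.inr rfl)
        · exact Or.inl h
      · exact Or.inr (Or.inl h)
    · intro v hv
      rw [hvis, List.mem_append, List.mem_singleton] at hv
      rcases hv with hv | rfl
      · rcases PAR' v hv with h | ⟨w, hw, hkw⟩
        · exact Or.inr ⟨c, by rw [hvis]; simp, h⟩
        · exact Or.inr ⟨w, by rw [hvis]; simp [hw], hkw⟩
      · exact Or.inl rfl

theorem pvForest (tr : PySem.Dict String (Int × Int)) (ch : PySem.Dict String (List String))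
    (hUP : ∀ p q x, tr.contains p = true → tr.contains q = true →
      x ∈ pvKids tr ch p → x ∈ pvKids tr ch q → p = q)
    (hKN : ∀ p, tr.contains p = true → (pvKids tr ch p).Nodup) (G : Nat) :
    ∀ (rs : List String) (R : Finset String),
      rs.Nodup →
      (∀ r ∈ rs, tr.contains r = true) →
      (∀ r ∈ rs, ∀ p, tr.contains p = true → r ∉ pvKids tr ch p) →
      (∀ r ∈ rs, r ∉ R) →
      (∀ v ∈ R, ∀ p, tr.contains p = true → v ∈ pvKids tr ch p → p ∈ R) →
      (tr.keys.toFinset \ R).card < G →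
      (∀ r ∈ rs, pvComplete tr ch G r) ∧
      (rs.flatMap (pvVisited tr ch G)).Nodup ∧
      (∀ x ∈ rs.flatMap (pvVisited tr ch G), tr.contains x = true ∧ x ∉ R) := by
  intro rs
  induction rs with
  | nil => intro R _ _ _ _ _ _; exact ⟨by simp, by simp, by simp⟩
  | cons r rs ihl =>
    intro R hnd hT hPL hR hINV hcard
    obtain ⟨C1, ND1, SUB1, INV1, PAR1⟩ := pvT tr ch hUP hKN G r R (hT r (by simp))
      (hR r (by simp))
      (fun p hp hk => absurd hk (hPL r (by simp) p hp))
      hINV hcard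
    obtain ⟨C', ND', SUB'⟩ := ihl (R ∪ (pvVisited tr ch G r).toFinset)
      (List.nodup_cons.mp hnd).2
      (fun r' hr' => hT r' (by simp [hr']))
      (fun r' hr' p hp => hPL r' (by simp [hr']) p hp)
      (by
        intro r' hr'
        rw [Finset.mem_union, List.mem_toFinset]
        rintro (h | h)
        · exact hR r' (by simp [hr']) h
        · rcases PAR1 r' h with rfl | ⟨w, hw, hkw⟩
          · exact (List.nodup_cons.mp hnd).1 hr'
          · exact hPL r' (by simp [hr']) w (SUB1 w hw).1 hkw)
      (by
        intro v hv p hp hk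
        rw [Finset.mem_union, List.mem_toFinset] at hv
        rcases hv with hv | hv
        · rcases INV1 v (Or.inl hv) p hp hk with h | h
          · exact Finset.mem_union_left _ h
          · exact Finset.mem_union_right _ (List.mem_toFinset.mpr h)
        · rcases INV1 v (Or.inr hv) p hp hk with h | h
          · exact Finset.mem_union_left _ h
          · exact Finset.mem_union_right _ (List.mem_toFinset.mpr h))
      (lt_of_le_of_lt (Finset.card_le_card (Finset.sdiff_subset_sdiff (Finset.Subset.refl _)
        Finset.subset_union_left)) hcard)
    have hdisj : ∀ x ∈ rs.flatMap (pvVisited tr ch G), x ∉ pvVisited tr ch G r := by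
      intro x hx hxr
      exact (SUB' x hx).2 (Finset.mem_union_right _ (List.mem_toFinset.mpr hxr))
    refine ⟨?_, ?_, ?_⟩
    · intro r' hr'
      rcases List.mem_cons.mp hr' with rfl | h
      · exact C1
      · exact C' r' h
    · rw [List.flatMap_cons, List.nodup_append]
      exact ⟨ND1, ND', fun a ha b hb hab => hdisj b hb (hab ▸ ha)⟩
    · intro x hx
      rw [List.flatMap_cons, List.mem_append] at hx
      rcases hx with hx | hx
      · exact SUB1 x hx
      · exact ⟨(SUB' x hx).1, fun hRx => (SUB' x hx).2 (Finset.mem_union_left _ hRx)⟩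

theorem pvCost_le (tr : PySem.Dict String (Int × Int)) (ch : PySem.Dict String (List String)) :
    ∀ (g : Nat) (c : String), pvCost tr ch g c ≤ 2 * (pvVisited tr ch g c).length := by
  intro g
  induction g with
  | zero => intro c; simp [pvCost, pvVisited]
  | succ g IH =>
    intro c
    by_cases hch : ch.contains c = true
    · have hsum : ∀ ks : List String,
          ((ks.map (pvCost tr ch g)).sum ≤ 2 * (ks.flatMap (pvVisited tr ch g)).length) := by
        intro ks
        induction ks with
        | nil => simp
        | cons k ks ihk =>
          have := IH k
          simp only [List.map_cons, List.sum_cons, List.flatMap_cons, List.length_append]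
          omega
      have := hsum (pvKids tr ch c)
      simp only [List.length_flatMap] at this
      simp only [pvCost, pvVisited, hch, if_true, List.length_append, List.length_flatMap,
        List.length_singleton]
      omega
    · have hch' : ch.contains c = false := by simpa using hch
      simp only [pvCost, pvVisited, hch', Bool.false_eq_true, if_false, List.length_append,
        List.length_flatMap, List.length_singleton]
      omega

theorem pvCostSum_le (tr : PySem.Dict String (Int × Int)) (ch : PySem.Dict String (List String))
    (g : Nat) : ∀ ks : List String,
    (ks.map (pvCost tr ch g)).sum ≤ 2 * (ks.flatMap (pvVisited tr ch g)).length := by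
  intro ks
  induction ks with
  | nil => simp
  | cons k ks ihk =>
    have := pvCost_le tr ch g k
    simp only [List.map_cons, List.sum_cons, List.flatMap_cons, List.length_append]
    omega

theorem pvLen_le (keys : List String) (L : List String) (hnd : L.Nodup)
    (hsub : ∀ x ∈ L, x ∈ keys) : L.length ≤ keys.length := by
  calc L.length = L.toFinset.card := (List.toFinset_card_of_nodup hnd).symm
    _ ≤ keys.toFinset.card := Finset.card_le_card (fun x hx =>
        List.mem_toFinset.mpr (hsub x (List.mem_toFinset.mp hx)))
    _ ≤ keys.length := List.toFinset_card_le keys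

-- dict-from-association-list bridges (keys Nodup)
theorem pvItems_ofList {ν : Type} (l : List (String × ν)) (h : (l.map Prod.fst).Nodup) :
    (PySem.Dict.ofList l).items = l := by
  have := PySem.Dict.items_foldl_insert_fresh l Prod.fst Prod.snd
    (PySem.Dict.empty : PySem.Dict String ν) (fun a _ => by simp) h
  simpa [PySem.Dict.ofList, PySem.Dict.update] using this

theorem pvKeys_ofList {ν : Type} (l : List (String × ν)) (h : (l.map Prod.fst).Nodup) :
    (PySem.Dict.ofList l).keys = l.map Prod.fst := by
  simp [PySem.Dict.keys, pvItems_ofList l h]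

theorem pvContains_ofList {ν : Type} (l : List (String × ν)) (h : (l.map Prod.fst).Nodup)
    (x : String) : (PySem.Dict.ofList l).contains x = decide (x ∈ l.map Prod.fst) := by
  rw [PySem.Dict.contains_eq_decide_mem_keys, pvKeys_ofList l h]

theorem pvGetD_ofList {ν : Type} (l : List (String × ν)) (h : (l.map Prod.fst).Nodup)
    {p : String} {cs : ν} (hmem : (p, cs) ∈ l) (d0 : ν) :
    (PySem.Dict.ofList l).getD p d0 = cs := by
  have h1 : (p, cs) ∈ (PySem.Dict.ofList l).items := by rw [pvItems_ofList l h]; exact hmem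
  have h2 : (PySem.Dict.ofList l).keys.Nodup := by rw [pvKeys_ofList l h]; exact h
  exact PySem.Dict.getD_of_mem_items _ h1 h2 d0

-- the roots-removal fold only shrinks the set, keeps it duplicate-free, and removes every
-- child of an in-trace parent
theorem pvRemFoldInner : ∀ (cs : List String) (s : PySem.Set String), s.Nodup →
    (cs.foldl (fun s c => (PySem.Set.remove? s c).getD s) s).Nodup ∧
    (∀ x ∈ cs.foldl (fun s c => (PySem.Set.remove? s c).getD s) s, x ∈ s) ∧
    (∀ c ∈ cs, c ∉ cs.foldl (fun s c => (PySem.Set.remove? s c).getD s) s) := by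
  intro cs
  induction cs with
  | nil => intro s hs; exact ⟨hs, fun x hx => hx, by simp⟩
  | cons c cs ih =>
    intro s hs
    have hstep : ((PySem.Set.remove? s c).getD s).Nodup ∧
        (∀ x ∈ (PySem.Set.remove? s c).getD s, x ∈ s) ∧ c ∉ (PySem.Set.remove? s c).getD s := by
      by_cases hc : PySem.Set.contains s c = true
      · have : PySem.Set.remove? s c = some (s.discard c) := by
          rw [PySem.Set.remove?, if_pos hc]
        rw [this, Option.getD_some]
        exact ⟨PySem.Set.nodup_discard s c hs,
          fun x hx => ((PySem.Set.mem_discard s c x).mp hx).1,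
          fun hcm => ((PySem.Set.mem_discard s c c).mp hcm).2 rfl⟩
      · have : PySem.Set.remove? s c = none := by rw [PySem.Set.remove?, if_neg hc]
        rw [this, Option.getD_none]
        refine ⟨hs, fun x hx => hx, ?_⟩
        rw [PySem.Set.contains_eq_decide] at hc
        simpa using hc
    obtain ⟨h1, h2, h3⟩ := hstep
    obtain ⟨ih1, ih2, ih3⟩ := ih ((PySem.Set.remove? s c).getD s) h1
    refine ⟨ih1, fun x hx => h2 x (ih2 x hx), ?_⟩
    intro c' hc'
    rcases List.mem_cons.mp hc' with rfl | hc'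
    · exact fun hm => h3 (ih2 c' hm)
    · exact ih3 c' hc'

theorem pvRemFoldOuter (tr : PySem.Dict String (Int × Int)) :
    ∀ (l : List (String × List String)) (s : PySem.Set String), s.Nodup →
    (l.foldl (fun r pc => if tr.contains pc.1 then
        pc.2.foldl (fun s c => (PySem.Set.remove? s c).getD s) r else r) s).Nodup ∧
    (∀ x ∈ l.foldl (fun r pc => if tr.contains pc.1 then
        pc.2.foldl (fun s c => (PySem.Set.remove? s c).getD s) r else r) s, x ∈ s) ∧
    (∀ pc ∈ l, tr.contains pc.1 = true → ∀ c ∈ pc.2,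
        c ∉ l.foldl (fun r pc => if tr.contains pc.1 then
          pc.2.foldl (fun s c => (PySem.Set.remove? s c).getD s) r else r) s) := by
  intro l
  induction l with
  | nil => intro s hs; exact ⟨hs, fun x hx => hx, by simp⟩
  | cons pc l ih =>
    intro s hs
    by_cases hp : tr.contains pc.1 = true
    · obtain ⟨h1, h2, h3⟩ := pvRemFoldInner pc.2 s hs
      obtain ⟨ih1, ih2, ih3⟩ := ih _ h1
      rw [List.foldl_cons] at *
      rw [if_pos hp]
      refine ⟨ih1, fun x hx => h2 x (ih2 x hx), ?_⟩
      intro pc' hpc' hp' c hc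
      rcases List.mem_cons.mp hpc' with rfl | hpc'
      · exact fun hm => h3 c hc (ih2 c hm)
      · exact ih3 pc' hpc' hp' c hc
    · obtain ⟨ih1, ih2, ih3⟩ := ih s hs
      rw [List.foldl_cons]
      rw [if_neg hp]
      refine ⟨ih1, ih2, ?_⟩
      intro pc' hpc' hp' c hc
      rcases List.mem_cons.mp hpc' with rfl | hpc'
      · exact absurd hp' hp
      · exact ih3 pc' hpc' hp' c hc

-- ===== VERDICT (by name: the statement is the Claim_ definition above) =====
theorem expand_time_ranges_spec : Claim_equal_expand_time_ranges := by
  intro time_ranges children _ hpre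
  obtain ⟨K1, K2, K3, K4⟩ := hpre
  unfold Spec_expand_time_ranges
  simp only [expand_time_ranges, expand_time_ranges_alt]
  set tr := PySem.Dict.ofList time_ranges with htr
  set ch := PySem.Dict.ofList children with hchd
  have htrC : ∀ x, tr.contains x = true ↔ x ∈ time_ranges.map Prod.fst := by
    intro x; rw [pvContains_ofList _ K1]; simp
  have hchC : ∀ x, ch.contains x = true ↔ x ∈ children.map Prod.fst := by
    intro x; rw [pvContains_ofList _ K2]; simp
  have hentry : ∀ p, ch.contains p = true → ∃ cs, (p, cs) ∈ children ∧ ch.getD p [] = cs := by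
    intro p hp
    rw [hchC] at hp
    obtain ⟨pair, hpair, hfst⟩ := List.mem_map.mp hp
    obtain ⟨p', cs⟩ := pair
    cases hfst
    exact ⟨cs, hpair, pvGetD_ofList children K2 hpair []⟩
  have hkids_sub : ∀ p x, x ∈ pvKids tr ch p →
      ch.contains p = true ∧ x ∈ ch.getD p [] ∧ tr.contains x = true := by
    intro p x hx
    by_cases hp : ch.contains p = true
    · simp only [pvKids, hp, if_true, List.mem_reverse, PySem.List.mem_sorted,
        List.mem_filter] at hx
      exact ⟨hp, hx.1, hx.2⟩
    · simp [pvKids, hp] at hx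
  have hUP : ∀ p q x, tr.contains p = true → tr.contains q = true →
      x ∈ pvKids tr ch p → x ∈ pvKids tr ch q → p = q := by
    intro p q x hpT hqT hxp hxq
    obtain ⟨hpC, hxp', _⟩ := hkids_sub p x hxp
    obtain ⟨hqC, hxq', _⟩ := hkids_sub q x hxq
    obtain ⟨csp, hmemp, hgetp⟩ := hentry p hpC
    obtain ⟨csq, hmemq, hgetq⟩ := hentry q hqC
    by_contra hne
    rcases pvPairwise_cases K4 hmemp hmemq with heq | hrel | hrel
    · exact hne (congrArg Prod.fst heq)
    · exact hrel ((htrC p).mp hpT) ((htrC q).mp hqT) x (hgetp ▸ hxp') (hgetq ▸ hxq')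
    · exact hrel ((htrC q).mp hqT) ((htrC p).mp hpT) x (hgetq ▸ hxq') (hgetp ▸ hxp')
  have hKN : ∀ p, tr.contains p = true → (pvKids tr ch p).Nodup := by
    intro p hpT
    by_cases hp : ch.contains p = true
    · obtain ⟨csp, hmemp, hgetp⟩ := hentry p hp
      have hndcs : csp.Nodup := (K3 (p, csp) hmemp ((htrC p).mp hpT)).1
      have h1 : ((ch.getD p []).filter (fun x => tr.contains x)).Nodup := by
        rw [hgetp]; exact hndcs.filter _
      have h2 := ((PySem.List.sorted_perm ((ch.getD p []).filter (fun x => tr.contains x))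
        (fun x => x) false).nodup_iff).mpr h1
      simp only [pvKids, hp, if_true, List.nodup_reverse]
      exact h2
    · simp [pvKids, hp]
  have hroots : pvRoots tr ch = ch.items.foldl
      (fun r pc => if tr.contains pc.1 then
        pc.2.foldl (fun s c => (PySem.Set.remove? s c).getD s) r else r)
      (PySem.Set.ofList tr.keys) := rfl
  obtain ⟨hRnd, hRsub, hRrem⟩ := pvRemFoldOuter tr ch.items (PySem.Set.ofList tr.keys)
    (PySem.Set.nodup_ofList _)
  rw [← hroots] at hRnd hRsub hRrem
  have hitems : ch.items = children := pvItems_ofList children K2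
  have hRmem : ∀ x ∈ pvRoots tr ch, tr.contains x = true := by
    intro x hx
    have := hRsub x hx
    rw [PySem.Set.mem_ofList] at this
    exact (PySem.Dict.contains_iff_mem_keys tr x).mpr this
  have hRparentless : ∀ r ∈ pvRoots tr ch, ∀ p, tr.contains p = true →
      r ∉ pvKids tr ch p := by
    intro r hr p hpT hk
    obtain ⟨hpC, hrin, _⟩ := hkids_sub p r hk
    obtain ⟨csp, hmemp, hgetp⟩ := hentry p hpC
    exact hRrem (p, csp) (by rw [hitems]; exact hmemp) hpT r (by rw [hgetp] at hrin; exact hrin) hr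
  set rootsSorted := PySem.List.sorted2 (pvRoots tr ch) (fun s => (tr.getD s (0, 0)).1)
    (fun s => (tr.getD s (0, 0)).2) false with hrsrt
  have hperm : rootsSorted.Perm (pvRoots tr ch) := PySem.List.sorted2_perm _ _ _ _
  have hrsnd : rootsSorted.reverse.Nodup := List.nodup_reverse.mpr (hperm.nodup_iff.mpr hRnd)
  have hrsmem : ∀ r ∈ rootsSorted.reverse, r ∈ pvRoots tr ch := fun r hr =>
    hperm.mem_iff.mp (List.mem_reverse.mp hr)
  have hkeys : tr.keys = time_ranges.map Prod.fst := pvKeys_ofList _ K1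
  have hcard : (tr.keys.toFinset \ ∅).card < time_ranges.length + 1 := by
    rw [Finset.sdiff_empty]
    have h1 := List.toFinset_card_le tr.keys
    have h2 : tr.keys.length = time_ranges.length := by rw [hkeys, List.length_map]
    omega
  obtain ⟨hcomp, hnd, hsub⟩ := pvForest tr ch hUP hKN (time_ranges.length + 1)
    rootsSorted.reverse ∅ hrsnd
    (fun r hr => hRmem r (hrsmem r hr))
    (fun r hr => hRparentless r (hrsmem r hr))
    (by simp) (by simp) hcard
  have hSum : (rootsSorted.reverse.map (pvCost tr ch (time_ranges.length + 1))).sum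
      ≤ 2 * time_ranges.length := by
    refine le_trans (pvCostSum_le tr ch _ _) ?_
    have hlen := pvLen_le tr.keys
      (rootsSorted.reverse.flatMap (pvVisited tr ch (time_ranges.length + 1))) hnd
      (fun x hx => (PySem.Dict.contains_iff_mem_keys tr x).mp (hsub x hx).1)
    rw [hkeys, List.length_map] at hlen
    omega
  have hfe : 2 * time_ranges.length + 1
      = (rootsSorted.reverse.map (pvCost tr ch (time_ranges.length + 1))).sum
        + (2 * time_ranges.length + 1
          - (rootsSorted.reverse.map (pvCost tr ch (time_ranges.length + 1))).sum) := by
    omega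
  have htop := pvTop tr ch (time_ranges.length + 1) rootsSorted.reverse
    (2 * time_ranges.length + 1
      - (rootsSorted.reverse.map (pvCost tr ch (time_ranges.length + 1))).sum) hcomp hnd
  have hstack : (rootsSorted.map (fun s => (s, (0 : Int)))).reverse
      = rootsSorted.reverse.map (fun s => (s, (0 : Int))) := by
    rw [List.map_reverse]
  rw [hstack, hfe, htop]
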